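-- pv_equiv track=rewrite | github.com/SharmaSimm/Restaurant-Menu | Program 3_2.py | find_closest_feasible_n
-- ===== SOURCE A (Python) =====
-- def find_nuggets_combination(n):
--     total_nuggets = [] #to store the possible combination
--     for a in range(n//6 + 1): #Iterate over possible 6-piece boxes
--         for b in range(n//9 +1): #Iterate over possible 9 pieces boxes
--             for c in range(n//22 + 1): #Iterate over possible 22 pieces boxes
--               #Checks if the current combination of boxes equals the desired quantity
--                 if 6 * a + 9*b + 22*c == n:
--                     total_nuggets.append(f" Six_piece:  {a},  Nine piece: {b}  , Twenty-two piece : {c} " ) #if it does add the combination to list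
--
--     return total_nuggets
--
-- def find_closest_feasible_n(n):
--     #Initialize variable to store the closest feasible value and its combinations
--     closest_n = None
--     closest_combinations = []
--
--     #Search for the closest feasible value by increasing and decreasing n
--     for offset in range(1, n + 22): #Add a margin to ensure we find the closet
--
--         #Check the next feasible value above the requested quantit
--         upper_n = n + offset
--         upper_combinations = find_nuggets_combination(upper_n)
--         if upper_combinations:
--             closest_n = upper_n
--             closest_combinations = upper_combinations
--             break
--
--         #Check the next feasible value below the requested quantity
--         lower_n = n - offset
--         if lower_n > 0 : # Ensure we donot go negative or zero
--             lower_combinations = find_nuggets_combination(lower_n)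
--             if lower_combinations:
--                 closest_n = lower_n
--                 closest_combinations = lower_combinations
--                 break
--
--     return closest_n, closest_combinations
-- ===== SOURCE B (Python) =====
-- def _feasible(m):
--     # m = 6a+9b+22c iff for some c, m-22c is a nonnegative multiple of 3 other than 3
--     for c in range(m // 22 + 1):
--         r = m - 22 * c
--         if r % 3 == 0 and r != 3:
--             return True
--     return False
--
-- def _combos(m):
--     # same strings as A, but c is derived from divisibility of the remainder by 22
--     return [f" Six_piece:  {a},  Nine piece: {b}  , Twenty-two piece : {(m - 6 * a - 9 * b) // 22} "
--             for a in range(m // 6 + 1)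
--             for b in range((m - 6 * a) // 9 + 1)
--             if (m - 6 * a - 9 * b) % 22 == 0]
--
-- def find_closest_feasible_n(n):
--     for offset in range(1, n + 22):
--         if _feasible(n + offset):
--             return n + offset, _combos(n + offset)
--         if n - offset > 0 and _feasible(n - offset):
--             return n - offset, _combos(n - offset)
--     return None, []
-- ===== Notes on version B (the rewrite author's own statement) =====
-- stated objective: faster
-- what changed: B first locates the closest feasible value with a cheap linear number-theoretic feasibility test (after removing some number of large boxes, the remainder must be a nonnegative multiple of three other than three itself) and only then enumerates the combinations once, as a two-level comprehension over the small and medium box counts that derives the large-box count from divisibility of the remainder, replacing A's cubic triple nested scan run on every candidate.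
import Mathlib
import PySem

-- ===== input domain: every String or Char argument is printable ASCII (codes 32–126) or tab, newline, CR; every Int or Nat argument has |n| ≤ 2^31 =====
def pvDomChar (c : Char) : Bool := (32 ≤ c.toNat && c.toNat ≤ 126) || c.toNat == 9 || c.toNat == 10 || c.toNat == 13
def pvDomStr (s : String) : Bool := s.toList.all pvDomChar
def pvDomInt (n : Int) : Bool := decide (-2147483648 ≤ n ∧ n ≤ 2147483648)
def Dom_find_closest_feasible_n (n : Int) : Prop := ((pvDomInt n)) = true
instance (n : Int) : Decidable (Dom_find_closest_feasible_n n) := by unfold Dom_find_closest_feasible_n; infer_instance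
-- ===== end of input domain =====

-- B finds the closest feasible value with a cheap divisibility-based feasibility test and
-- enumerates the combinations once, with c derived from the remainder (objective: faster).

-- the f-string both programs build (identical literal in both Pythons)
def pvFmt (a b c : Int) : String :=
  " Six_piece:  " ++ PySem.Int.toStr a ++ ",  Nine piece: " ++ PySem.Int.toStr b ++
    "  , Twenty-two piece : " ++ PySem.Int.toStr c ++ " "

-- ===== PORT A =====
def find_nuggets_combination (m : Int) : List String :=
  (PySem.List.pyRange 0 (PySem.Int.floordiv m 6 + 1) 1).foldl (fun acc a =>
    (PySem.List.pyRange 0 (PySem.Int.floordiv m 9 + 1) 1).foldl (fun acc b =>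
      (PySem.List.pyRange 0 (PySem.Int.floordiv m 22 + 1) 1).foldl (fun acc c =>
        if 6 * a + 9 * b + 22 * c == m then acc ++ [pvFmt a b c] else acc) acc) acc) []

-- A's offset loop with break, as structural recursion over the offsets list
def pvSearchA (n : Int) : List Int → Option Int × List String
  | [] => (none, [])
  | off :: rest =>
      let uc := find_nuggets_combination (n + off)
      if uc ≠ [] then (some (n + off), uc)
      else if n - off > 0 then
        let lc := find_nuggets_combination (n - off)
        if lc ≠ [] then (some (n - off), lc) else pvSearchA n rest
      else pvSearchA n rest

def find_closest_feasible_n (n : Int) : Option Int × List String :=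
  pvSearchA n (PySem.List.pyRange 1 (n + 22) 1)

-- ===== PORT B =====
-- B's _feasible: early-return for loop = any over the range
def pvFeasible (m : Int) : Bool :=
  (PySem.List.pyRange 0 (PySem.Int.floordiv m 22 + 1) 1).any (fun c =>
    PySem.Int.mod (m - 22 * c) 3 == 0 && !(m - 22 * c == 3))

-- B's _combos: a two-level list comprehension (flatMap) deriving c from the remainder
def pvCombosB (m : Int) : List String :=
  (PySem.List.pyRange 0 (PySem.Int.floordiv m 6 + 1) 1).flatMap (fun a =>
    (PySem.List.pyRange 0 (PySem.Int.floordiv (m - 6 * a) 9 + 1) 1).flatMap (fun b =>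
      if PySem.Int.mod (m - 6 * a - 9 * b) 22 == 0 then
        [pvFmt a b (PySem.Int.floordiv (m - 6 * a - 9 * b) 22)] else []))

-- B's offset loop with early returns, testing feasibility before enumerating
def pvSearchB (n : Int) : List Int → Option Int × List String
  | [] => (none, [])
  | off :: rest =>
      if pvFeasible (n + off) then (some (n + off), pvCombosB (n + off))
      else if n - off > 0 && pvFeasible (n - off) then (some (n - off), pvCombosB (n - off))
      else pvSearchB n rest

def find_closest_feasible_n_alt (n : Int) : Option Int × List String :=
  pvSearchB n (PySem.List.pyRange 1 (n + 22) 1)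

-- ===== PRECONDITION & SPEC =====
def Spec_find_closest_feasible_n (n : Int) (out : Option Int × List String) : Prop := out = find_closest_feasible_n_alt n
instance (n : Int) (out : Option Int × List String) : Decidable (Spec_find_closest_feasible_n n out) := by unfold Spec_find_closest_feasible_n; infer_instance

-- ===== CLAIM (what is proved, stated in full; the proofs are below) =====
def Claim_equal_find_closest_feasible_n : Prop := ∀ (n : Int), Dom_find_closest_feasible_n n → Spec_find_closest_feasible_n n (find_closest_feasible_n n)

-- ===== LEMMAS AND PROOFS =====

-- A's c-loop over range(m//22+1) keeps exactly one c, namely (m-A)/22 when m-A is a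
-- nonnegative multiple of 22 (stated over List.range, the shape pyRange_zero produces)
theorem pvFilterInt (N : Nat) (A m : Int) :
    List.map (fun (k : Nat) => (k : Int)) ((List.range N).filter (fun (x : Nat) => A + 22 * (x : Int) == m)) =
      if 0 ≤ m - A ∧ 22 ∣ (m - A) ∧ m - A < 22 * N then [(m - A) / 22] else [] := by
  induction N with
  | zero => simp; omega
  | succ n ih =>
    rw [List.range_succ, List.filter_append, List.map_append, ih]
    by_cases h : A + 22 * (n : Int) = m
    · have h3 : (m - A) / 22 = (n : Int) := by
        have : m - A = 22 * n := by omega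
        rw [this]; exact Int.mul_ediv_cancel_left _ (by norm_num)
      have h2 : (0 ≤ m - A ∧ 22 ∣ (m - A) ∧ m - A < 22 * ((n : Nat) + 1 : Nat)) := by
        refine ⟨by omega, ⟨n, by omega⟩, by push_cast; omega⟩
      simp [h, h2, h3]
      split_ifs <;> simp_all; omega
    · simp [h]
      by_cases hd : (22 : Int) ∣ m - A
      · obtain ⟨q, hq⟩ := hd
        have hiff : (A ≤ m ∧ 22 ∣ (m - A) ∧ m - A < 22 * (n : Int)) ↔
            (A ≤ m ∧ 22 ∣ (m - A) ∧ m - A < 22 * ((n : Int) + 1)) := by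
          constructor
          · rintro ⟨x, y, z⟩; exact ⟨x, y, by omega⟩
          · rintro ⟨x, y, z⟩; exact ⟨x, y, by omega⟩
        rw [if_congr hiff rfl rfl]
      · simp [hd]

-- collapsing one full c-loop of A into B's divisibility test
theorem pvCFold (m a b : Int) (hab : 0 ≤ 6 * a + 9 * b) (acc : List String) :
    (PySem.List.pyRange 0 (PySem.Int.floordiv m 22 + 1) 1).foldl (fun acc c =>
        if 6 * a + 9 * b + 22 * c == m then acc ++ [pvFmt a b c] else acc) acc =
      acc ++ (if 0 ≤ m - 6 * a - 9 * b ∧ 22 ∣ (m - 6 * a - 9 * b) then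
        [pvFmt a b (PySem.Int.floordiv (m - 6 * a - 9 * b) 22)] else []) := by
  rw [PySem.List.foldl_append_if (p := fun c => 6 * a + 9 * b + 22 * c == m) (f := fun c => pvFmt a b c)]
  congr 1
  rw [PySem.List.pyRange_zero, List.filter_map]
  simp only [Function.comp_def]
  rw [pvFilterInt ((PySem.Int.floordiv m 22 + 1).toNat) (6 * a + 9 * b) m]
  have hA : m - (6 * a + 9 * b) = m - 6 * a - 9 * b := by ring
  by_cases hc : 0 ≤ m - 6 * a - 9 * b ∧ 22 ∣ (m - 6 * a - 9 * b)
  · obtain ⟨h0, hd⟩ := hc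
    have hm : 0 ≤ m := by omega
    have hfd : PySem.Int.floordiv m 22 = m / 22 := PySem.Int.floordiv_eq_ediv_of_pos (by norm_num)
    have htn : ((PySem.Int.floordiv m 22 + 1).toNat : Int) = m / 22 + 1 := by
      rw [hfd]; rw [Int.toNat_of_nonneg (by positivity)]
    have hde := Int.mul_ediv_add_emod m 22
    have hlt := Int.emod_lt_of_pos m (b := 22) (by norm_num)
    have hge := Int.emod_nonneg m (b := 22) (by norm_num)
    have hcond : 0 ≤ m - (6 * a + 9 * b) ∧ 22 ∣ (m - (6 * a + 9 * b)) ∧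
        m - (6 * a + 9 * b) < 22 * ((PySem.Int.floordiv m 22 + 1).toNat : Int) := by
      refine ⟨by omega, by rw [hA]; exact hd, by rw [htn]; omega⟩
    rw [if_pos hcond, if_pos ⟨h0, hd⟩]
    have : PySem.Int.floordiv (m - 6 * a - 9 * b) 22 = (m - (6 * a + 9 * b)) / 22 := by
      rw [PySem.Int.floordiv_eq_ediv_of_pos (by norm_num), hA]
    rw [this, hA]
    simp
  · have hcond : ¬ (0 ≤ m - (6 * a + 9 * b) ∧ 22 ∣ (m - (6 * a + 9 * b)) ∧
        m - (6 * a + 9 * b) < 22 * ((PySem.Int.floordiv m 22 + 1).toNat : Int)) := by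
      rw [hA]; rintro ⟨x, y, z⟩; exact hc ⟨x, y⟩
    rw [if_neg hcond, if_neg hc]
    simp

-- one iteration of A's a-loop equals the a-th slice of B's comprehension: A's wider
-- b-range contributes nothing beyond B's remainder-tightened b-range
theorem pvBFold (m a : Int) (ha : 0 ≤ a) (h6 : 6 * a ≤ m) (acc : List String) :
    (PySem.List.pyRange 0 (PySem.Int.floordiv m 9 + 1) 1).foldl (fun acc b =>
        (PySem.List.pyRange 0 (PySem.Int.floordiv m 22 + 1) 1).foldl (fun acc c =>
          if 6 * a + 9 * b + 22 * c == m then acc ++ [pvFmt a b c] else acc) acc) acc =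
      acc ++ (PySem.List.pyRange 0 (PySem.Int.floordiv (m - 6 * a) 9 + 1) 1).flatMap (fun b =>
        if PySem.Int.mod (m - 6 * a - 9 * b) 22 == 0 then
          [pvFmt a b (PySem.Int.floordiv (m - 6 * a - 9 * b) 22)] else []) := by
  have hra : 0 ≤ m - 6 * a := by omega
  have hf9 : PySem.Int.floordiv (m - 6 * a) 9 = (m - 6 * a) / 9 :=
    PySem.Int.floordiv_eq_ediv_of_pos (by norm_num)
  have hf9m : PySem.Int.floordiv m 9 = m / 9 := PySem.Int.floordiv_eq_ediv_of_pos (by norm_num)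
  have hmid0 : 0 ≤ PySem.Int.floordiv (m - 6 * a) 9 := by
    rw [hf9]; exact Int.ediv_nonneg hra (by norm_num)
  have hmidle : PySem.Int.floordiv (m - 6 * a) 9 ≤ PySem.Int.floordiv m 9 := by
    rw [hf9, hf9m]; exact Int.ediv_le_ediv (by norm_num) (by omega)
  -- A side: collapse each inner c-loop, then turn the b-loop into a flatMap
  rw [PySem.List.foldl_congr_mem' _ _
      (fun acc b => acc ++ (if 0 ≤ m - 6 * a - 9 * b ∧ 22 ∣ (m - 6 * a - 9 * b) then
        [pvFmt a b (PySem.Int.floordiv (m - 6 * a - 9 * b) 22)] else [])) _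
      (by
        intro b hb acc
        have hb0 : 0 ≤ b := (PySem.List.mem_pyRange_one.mp hb).1
        exact pvCFold m a b (by omega) acc)]
  rw [PySem.List.foldl_append_eq_flatMap]
  congr 1
  -- split A's b-range at B's bound
  rw [PySem.List.pyRange_one_append 0 (PySem.Int.floordiv (m - 6 * a) 9 + 1)
      (PySem.Int.floordiv m 9 + 1) (by omega) (by omega), List.flatMap_append]
  have htail : (PySem.List.pyRange (PySem.Int.floordiv (m - 6 * a) 9 + 1)
      (PySem.Int.floordiv m 9 + 1) 1).flatMap (fun b =>
        if 0 ≤ m - 6 * a - 9 * b ∧ 22 ∣ (m - 6 * a - 9 * b) then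
          [pvFmt a b (PySem.Int.floordiv (m - 6 * a - 9 * b) 22)] else []) = [] := by
    rw [List.flatMap_eq_nil_iff]
    intro b hb
    have h1 : PySem.Int.floordiv (m - 6 * a) 9 + 1 ≤ b := (PySem.List.mem_pyRange_one.mp hb).1
    have h2 : m - 6 * a < b * 9 := (PySem.Int.floordiv_lt_iff_lt_mul (by norm_num)).mp (by omega)
    rw [if_neg]; rintro ⟨h0, -⟩; omega
  rw [htail, List.append_nil]
  apply List.flatMap_congr
  intro b hb
  obtain ⟨hb0, hblt⟩ := PySem.List.mem_pyRange_one.mp hb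
  have h9 : b * 9 ≤ m - 6 * a := (PySem.Int.le_floordiv_iff_mul_le (by norm_num)).mp (by omega)
  have h0 : 0 ≤ m - 6 * a - 9 * b := by omega
  by_cases hd : (22 : Int) ∣ (m - 6 * a - 9 * b)
  · rw [if_pos ⟨h0, hd⟩, if_pos (by simp [beq_iff_eq]; exact hd)]
  · rw [if_neg (by rintro ⟨-, h⟩; exact hd h),
        if_neg (by simp [beq_iff_eq]; exact hd)]

theorem pvCombos_eq (m : Int) : find_nuggets_combination m = pvCombosB m := by
  simp only [find_nuggets_combination, pvCombosB]
  rw [PySem.List.foldl_congr_mem' _ _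
      (fun acc a => acc ++ (PySem.List.pyRange 0 (PySem.Int.floordiv (m - 6 * a) 9 + 1) 1).flatMap
        (fun b => if PySem.Int.mod (m - 6 * a - 9 * b) 22 == 0 then
          [pvFmt a b (PySem.Int.floordiv (m - 6 * a - 9 * b) 22)] else [])) _
      (by
        intro a hamem acc
        obtain ⟨ha0, halt⟩ := PySem.List.mem_pyRange_one.mp hamem
        have h6 : 6 * a ≤ m := by
          have := (PySem.Int.le_floordiv_iff_mul_le (a := m) (b := 6) (q := a) (by norm_num)).mp (by omega)
          omega
        exact pvBFold m a ha0 h6 acc)]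
  rw [PySem.List.foldl_append_eq_flatMap]
  simp

-- B's feasibility test fires exactly when A finds at least one combination
theorem pvFeas_iff (m : Int) : pvFeasible m = true ↔ pvCombosB m ≠ [] := by
  unfold pvFeasible pvCombosB
  rw [List.any_eq_true]
  constructor
  · rintro ⟨c, hc, hP⟩
    obtain ⟨hc0, hclt⟩ := PySem.List.mem_pyRange_one.mp hc
    have h22 : c * 22 ≤ m := (PySem.Int.le_floordiv_iff_mul_le (by norm_num)).mp (by omega)
    simp only [Bool.and_eq_true, beq_iff_eq, Bool.not_eq_true', beq_eq_false_iff_ne] at hP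
    obtain ⟨hmod, hne3⟩ := hP
    obtain ⟨k, hk⟩ := (PySem.Int.mod_eq_zero_iff_dvd _ _).mp hmod
    have hk0 : 0 ≤ k := by omega
    have hk1 : k ≠ 1 := by rintro rfl; omega
    -- build (a, b): k even → (k/2, 0); k odd (so k ≥ 3) → ((k-3)/2, 1)
    obtain ⟨a, b, ha0, hb0, hab⟩ : ∃ a b : Int, 0 ≤ a ∧ 0 ≤ b ∧ 6 * a + 9 * b = 3 * k := by
      rcases Int.even_or_odd k with ⟨t, ht⟩ | ⟨t, ht⟩
      · exact ⟨t, 0, by omega, le_refl 0, by omega⟩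
      · refine ⟨t - 1, 1, by omega, by norm_num, by omega⟩
    intro hnil
    have hamem : a ∈ PySem.List.pyRange 0 (PySem.Int.floordiv m 6 + 1) 1 := by
      apply PySem.List.mem_pyRange_one.mpr
      refine ⟨ha0, ?_⟩
      have : a ≤ PySem.Int.floordiv m 6 := (PySem.Int.le_floordiv_iff_mul_le (by norm_num)).mpr (by omega)
      omega
    have hbmem : b ∈ PySem.List.pyRange 0 (PySem.Int.floordiv (m - 6 * a) 9 + 1) 1 := by
      apply PySem.List.mem_pyRange_one.mpr
      refine ⟨hb0, ?_⟩
      have : b ≤ PySem.Int.floordiv (m - 6 * a) 9 := (PySem.Int.le_floordiv_iff_mul_le (by norm_num)).mpr (by omega)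
      omega
    have h1 := List.flatMap_eq_nil_iff.mp hnil a hamem
    have h2 := List.flatMap_eq_nil_iff.mp h1 b hbmem
    have hr : m - 6 * a - 9 * b = 22 * c := by omega
    rw [if_pos (by rw [hr]; simp)] at h2
    exact absurd h2 (by simp)
  · intro hne
    by_contra hno
    apply hne
    rw [List.flatMap_eq_nil_iff]
    intro a ha
    rw [List.flatMap_eq_nil_iff]
    intro b hb
    obtain ⟨ha0, halt⟩ := PySem.List.mem_pyRange_one.mp ha
    obtain ⟨hb0, hblt⟩ := PySem.List.mem_pyRange_one.mp hb
    have h6 : a * 6 ≤ m := (PySem.Int.le_floordiv_iff_mul_le (by norm_num)).mp (by omega)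
    have h9 : b * 9 ≤ m - 6 * a := (PySem.Int.le_floordiv_iff_mul_le (by norm_num)).mp (by omega)
    rw [if_neg]
    simp only [beq_iff_eq, PySem.Int.mod_eq_zero_iff_dvd]
    rintro ⟨c, hc⟩
    have hc0 : 0 ≤ c := by omega
    apply hno
    refine ⟨c, ?_, ?_⟩
    · apply PySem.List.mem_pyRange_one.mpr
      refine ⟨hc0, ?_⟩
      have : c ≤ PySem.Int.floordiv m 22 := (PySem.Int.le_floordiv_iff_mul_le (by norm_num)).mpr (by omega)
      omega
    · have hr : m - 22 * c = 6 * a + 9 * b := by omega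
      simp only [Bool.and_eq_true, beq_iff_eq, Bool.not_eq_true', beq_eq_false_iff_ne]
      constructor
      · rw [PySem.Int.mod_eq_zero_iff_dvd, hr]; exact ⟨2 * a + 3 * b, by ring⟩
      · rw [hr]; omega

theorem pvSearch_eq (n : Int) (l : List Int) : pvSearchA n l = pvSearchB n l := by
  induction l with
  | nil => rfl
  | cons off rest ih =>
    simp only [pvSearchA, pvSearchB, pvCombos_eq, ih]
    by_cases hu : pvCombosB (n + off) = []
    · have hfu : pvFeasible (n + off) = false := by
        rw [← Bool.not_eq_true, pvFeas_iff]
        simpa using hu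
      by_cases hl : off < n
      · by_cases hlc : pvCombosB (n - off) = []
        · have hfl : pvFeasible (n - off) = false := by
            rw [← Bool.not_eq_true, pvFeas_iff]
            simpa using hlc
          simp [hu, hfu, hl, hlc, hfl]
        · have hfl : pvFeasible (n - off) = true := (pvFeas_iff _).mpr hlc
          simp [hu, hfu, hl, hlc, hfl]
      · simp [hu, hfu, hl]
    · have hfu : pvFeasible (n + off) = true := (pvFeas_iff _).mpr hu
      simp [hu, hfu]

-- ===== VERDICT (by name: the statement is the Claim_ definition above) =====
theorem find_closest_feasible_n_spec : Claim_equal_find_closest_feasible_n := by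
  intro n _
  unfold Spec_find_closest_feasible_n find_closest_feasible_n find_closest_feasible_n_alt
  exact pvSearch_eq n _
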